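-- pv_equiv track=rewrite | github.com/Carson-Reed12/advent-of-code | 2023/Day10/day10.py | returnNSGroups
-- ===== SOURCE A (Python) =====
-- def returnNSGroups(nodes):
--     north_group = []
--     south_group = []
--     ns_direction = True
--
--     for i in range(len(nodes)):
--         current_node = nodes[i]
--
--         try:
--             next_node = nodes[i+1]
--         except:
--             next_node = nodes[0]
--
--         if [current_node[0] - 1, current_node[1]] == next_node and not ns_direction:
--             ns_direction = not ns_direction
--         if [current_node[0] + 1, current_node[1]] == next_node and ns_direction:
--             ns_direction = not ns_direction
--
--         if ns_direction:
--             north_group.append(current_node)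
--         else:
--             south_group.append(current_node)
--
--     return north_group, south_group
-- ===== SOURCE B (Python) =====
-- def returnNSGroups(nodes):
--     n = len(nodes)
--     # event at i: 1 if the next cycle node is one row up, -1 if one row down, else 0
--     events = []
--     for i in range(n):
--         nxt = nodes[(i + 1) % n]
--         if nxt == [nodes[i][0] - 1, nodes[i][1]]:
--             events.append(1)
--         elif nxt == [nodes[i][0] + 1, nodes[i][1]]:
--             events.append(-1)
--         else:
--             events.append(0)
--     # cut points: each event starts a new constant-direction segment at its index
--     cuts = [(i, e) for i, e in enumerate(events) if e != 0]
--     north, south = [], []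
--     prev, state = 0, 1
--     for i, e in cuts:
--         (north if state == 1 else south).extend(nodes[prev:i])
--         prev, state = i, e
--     (north if state == 1 else south).extend(nodes[prev:])
--     return north, south
-- ===== Notes on version B (the rewrite author's own statement) =====
-- stated objective: alternative
-- what changed: A carries a running north/south flag and appends node by node; B first computes a state-free per-node event list (up/down/none), reduces it to cut points, and then builds the groups segment-wise by extending with whole slices nodes[prev:i] between consecutive cuts.
import Mathlib
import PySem

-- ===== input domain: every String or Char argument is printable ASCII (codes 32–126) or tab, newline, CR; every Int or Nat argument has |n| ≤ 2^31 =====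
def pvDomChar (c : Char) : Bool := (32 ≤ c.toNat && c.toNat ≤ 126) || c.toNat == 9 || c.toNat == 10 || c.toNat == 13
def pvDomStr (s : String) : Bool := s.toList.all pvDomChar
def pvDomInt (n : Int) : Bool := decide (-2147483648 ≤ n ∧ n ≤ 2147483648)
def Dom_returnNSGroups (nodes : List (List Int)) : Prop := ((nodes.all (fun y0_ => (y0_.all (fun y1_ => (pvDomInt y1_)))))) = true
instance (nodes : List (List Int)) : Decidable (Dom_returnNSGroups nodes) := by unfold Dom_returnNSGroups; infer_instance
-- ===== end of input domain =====

-- B replaces A's running north/south flag (updated and appended node by node) by a state-free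
-- per-node event table reduced to cut points, building the groups segment-wise from whole slices;
-- objective: alternative decomposition, no speed claim.

-- ===== PORT A =====
-- current_node = nodes[i]  (inside Pre_ always in range; [] default never used there)
def pvCurA (nodes : List (List Int)) (i : Int) : List Int :=
  (PySem.List.pyGet? nodes i).getD []

-- try: next_node = nodes[i+1] except: next_node = nodes[0]
def pvNxtA (nodes : List (List Int)) (i : Int) : List Int :=
  match PySem.List.pyGet? nodes (i + 1) with
  | some v => v
  | none => (PySem.List.pyGet? nodes 0).getD []

-- the two successive 'if … : ns_direction = not ns_direction' statements of A
def pvUpdA (nodes : List (List Int)) (i : Int) (d : Bool) : Bool :=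
  let cur := pvCurA nodes i
  let nxt := pvNxtA nodes i
  let r := (PySem.List.pyGet? cur 0).getD 0
  let c := (PySem.List.pyGet? cur 1).getD 0
  let d1 := if [r - 1, c] = nxt ∧ d = false then !d else d
  if [r + 1, c] = nxt ∧ d1 = true then !d1 else d1

-- one iteration of A's loop body over state (north_group, south_group, ns_direction)
def pvStepA (nodes : List (List Int)) (st : List (List Int) × List (List Int) × Bool)
    (i : Int) : List (List Int) × List (List Int) × Bool :=
  let cur := pvCurA nodes i
  let d := pvUpdA nodes i st.2.2
  if d then (st.1 ++ [cur], st.2.1, d) else (st.1, st.2.1 ++ [cur], d)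

def returnNSGroups (nodes : List (List Int)) : List (List Int) × List (List Int) :=
  let st := (PySem.List.pyRange 0 nodes.length 1).foldl (pvStepA nodes) ([], [], true)
  (st.1, st.2.1)

-- ===== PORT B =====
-- event at i: 1 if nodes[(i+1)%n] is one row up, -1 if one row down, else 0
def pvEvB (nodes : List (List Int)) (i : Int) : Int :=
  let nxt := (PySem.List.pyGet? nodes (PySem.Int.mod (i + 1) nodes.length)).getD []
  let cur := (PySem.List.pyGet? nodes i).getD []
  let r := (PySem.List.pyGet? cur 0).getD 0
  let c := (PySem.List.pyGet? cur 1).getD 0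
  if nxt = [r - 1, c] then 1 else if nxt = [r + 1, c] then -1 else 0

-- B's loop over cuts: extend the current side with the slice nodes[prev:i], then prev, state = i, e
def pvStepB (nodes : List (List Int))
    (st : (List (List Int) × List (List Int)) × Int × Int) (p : Int × Int) :
    (List (List Int) × List (List Int)) × Int × Int :=
  let seg := PySem.List.slice nodes (some st.2.1) (some p.1)
  (if st.2.2 = 1 then (st.1.1 ++ seg, st.1.2) else (st.1.1, st.1.2 ++ seg), p.1, p.2)

-- B's final extend with nodes[prev:]
def pvFinishB (nodes : List (List Int))
    (st : (List (List Int) × List (List Int)) × Int × Int) :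
    List (List Int) × List (List Int) :=
  let last := PySem.List.slice nodes (some st.2.1) none
  if st.2.2 = 1 then (st.1.1 ++ last, st.1.2) else (st.1.1, st.1.2 ++ last)

def returnNSGroups_alt (nodes : List (List Int)) : List (List Int) × List (List Int) :=
  let events := (PySem.List.pyRange 0 nodes.length 1).foldl
      (fun acc i => acc ++ [pvEvB nodes i]) []
  let cuts := (PySem.List.enumerate events 0).filter (fun p => p.2 != 0)
  pvFinishB nodes (cuts.foldl (pvStepB nodes) (([], []), 0, 1))

-- ===== PRECONDITION & SPEC =====
-- Pre_ excludes only inputs where Python A raises IndexError: some node with fewer than 2 coordinates.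
def Pre_returnNSGroups (nodes : List (List Int)) : Prop :=
  ∀ node ∈ nodes, 2 ≤ node.length
instance (nodes : List (List Int)) : Decidable (Pre_returnNSGroups nodes) := by
  unfold Pre_returnNSGroups; infer_instance

def pvWitness_returnNSGroups : List (List Int) := [[0, 0], [1, 0], [1, 1], [0, 1]]

def Spec_returnNSGroups (nodes : List (List Int)) (out : List (List Int) × List (List Int)) : Prop := out = returnNSGroups_alt nodes
instance (nodes : List (List Int)) (out : List (List Int) × List (List Int)) : Decidable (Spec_returnNSGroups nodes out) := by unfold Spec_returnNSGroups; infer_instance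

-- ===== CLAIM (what is proved, stated in full; the proofs are below) =====
def Claim_equal_returnNSGroups : Prop := ∀ (nodes : List (List Int)), Dom_returnNSGroups nodes → Pre_returnNSGroups nodes → Spec_returnNSGroups nodes (returnNSGroups nodes)

-- ===== LEMMAS AND PROOFS =====

-- the direction after an event: 1 forces north, -1 forces south, 0 keeps it
def pvDirUpd (e : Int) (d : Bool) : Bool :=
  if e = 1 then true else if e = -1 then false else d

-- reference recursion: partition a (node, event) list by the running direction, also return the final direction
def pvG : List (List Int × Int) → Bool → List (List Int) × List (List Int) × Bool
  | [], d => ([], [], d)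
  | (x, e) :: rest, d =>
    let d' := pvDirUpd e d
    let X := pvG rest d'
    (if d' then x :: X.1 else X.1, if d' then X.2.1 else x :: X.2.1, X.2.2)

theorem pvG_zeros (xs : List (List Int)) (d : Bool) :
    pvG (xs.map (fun x => (x, 0))) d =
      (if d then xs else [], if d then [] else xs, d) := by
  induction xs with
  | nil => cases d <;> simp [pvG]
  | cons x rest ih => cases d <;> simp_all [pvG, pvDirUpd]

theorem pvG_append (as bs : List (List Int × Int)) (d : Bool) :
    pvG (as ++ bs) d =
      ((pvG as d).1 ++ (pvG bs (pvG as d).2.2).1,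
       (pvG as d).2.1 ++ (pvG bs (pvG as d).2.2).2.1,
       (pvG bs (pvG as d).2.2).2.2) := by
  induction as generalizing d with
  | nil => simp [pvG]
  | cons p rest ih =>
    obtain ⟨x, e⟩ := p
    by_cases hd : pvDirUpd e d <;> simp [pvG, hd, ih]

-- A's pair of conditional toggles equals the event-based direction update
theorem pvIf_eq (r c : Int) (nxt : List Int) (d : Bool) :
    (if [r + 1, c] = nxt ∧ (if [r - 1, c] = nxt ∧ d = false then !d else d) = true
       then !(if [r - 1, c] = nxt ∧ d = false then !d else d)
       else (if [r - 1, c] = nxt ∧ d = false then !d else d)) =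
    pvDirUpd (if nxt = [r - 1, c] then 1 else if nxt = [r + 1, c] then -1 else 0) d := by
  have hab : ([r - 1, c] : List Int) ≠ [r + 1, c] := by intro h; simp at h; omega
  by_cases h1 : nxt = [r - 1, c]
  · cases d <;> simp [pvDirUpd, h1, Ne.symm hab]
  · by_cases h2 : nxt = [r + 1, c]
    · cases d <;> simp [pvDirUpd, h2, hab, Ne.symm hab]
    · cases d <;> simp [pvDirUpd, h1, h2, Ne.symm h1, Ne.symm h2]

-- A's per-step direction update is pvDirUpd of B's event, on in-range indices
theorem pvUpd_eq (nodes : List (List Int)) (k : Nat) (hk : k < nodes.length) (d : Bool) :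
    pvUpdA nodes (k : Int) d = pvDirUpd (pvEvB nodes (k : Int)) d := by
  have hcast : ((k : Int) + 1) = ((k + 1 : Nat) : Int) := by push_cast; ring
  have hnxt : pvNxtA nodes (k : Int) =
      (PySem.List.pyGet? nodes (PySem.Int.mod ((k : Int) + 1) nodes.length)).getD [] := by
    by_cases h : k + 1 < nodes.length
    · have hmod : PySem.Int.mod ((k : Int) + 1) nodes.length = ((k + 1 : Nat) : Int) := by
        rw [PySem.Int.mod_eq_emod_of_pos (by omega)]
        push_cast
        rw [Int.emod_eq_of_lt (by positivity) (by exact_mod_cast h)]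
      have hsome : PySem.List.pyGet? nodes ((k : Int) + 1) = some nodes[k + 1] := by
        rw [hcast]; exact PySem.List.pyGet?_ofNat _ _ h
      rw [hmod, PySem.List.pyGet?_ofNat _ _ h]
      simp [pvNxtA, hsome]
    · have hk1 : k + 1 = nodes.length := by omega
      have hmod : PySem.Int.mod ((k : Int) + 1) nodes.length = 0 := by
        rw [PySem.Int.mod_eq_emod_of_pos (by omega)]
        rw [show ((k : Int) + 1) = (nodes.length : Int) by omega]
        simp
      have hnone : PySem.List.pyGet? nodes ((k : Int) + 1) = none := by
        rw [hcast, PySem.List.pyGet?_natCast]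
        simp [hk1]
      rw [hmod]
      simp [pvNxtA, hnone]
  simp only [pvUpdA, pvEvB, pvCurA, hnxt]
  exact pvIf_eq _ _ _ d

-- A's fold equals the reference recursion over (node, event) pairs, appended to the accumulators
theorem pvFoldA_eq (nodes : List (List Int)) (es : List (Int × List Int))
    (H : ∀ p ∈ es, pvCurA nodes p.1 = p.2 ∧
        ∀ d, pvUpdA nodes p.1 d = pvDirUpd (pvEvB nodes p.1) d) :
    ∀ (N S : List (List Int)) (d : Bool),
      es.foldl (fun st p => pvStepA nodes st p.1) (N, S, d) =
        (N ++ (pvG (es.map (fun p => (p.2, pvEvB nodes p.1))) d).1,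
         S ++ (pvG (es.map (fun p => (p.2, pvEvB nodes p.1))) d).2.1,
         (pvG (es.map (fun p => (p.2, pvEvB nodes p.1))) d).2.2) := by
  induction es with
  | nil => intro N S d; simp [pvG]
  | cons p rest ih =>
    intro N S d
    obtain ⟨hcur, hupd⟩ := H p (List.mem_cons_self ..)
    have ihr := ih (fun q hq => H q (List.mem_cons_of_mem _ hq))
    by_cases hd : pvDirUpd (pvEvB nodes p.1) d
    · have hstep : pvStepA nodes (N, S, d) p.1 = (N ++ [p.2], S, true) := by
        simp [pvStepA, hcur, hupd, hd]
      rw [List.foldl_cons, hstep, ihr]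
      simp [pvG, hd]
    · have hd' : pvDirUpd (pvEvB nodes p.1) d = false := by simpa using hd
      have hstep : pvStepA nodes (N, S, d) p.1 = (N, S ++ [p.2], false) := by
        simp [pvStepA, hcur, hupd, hd']
      rw [List.foldl_cons, hstep, ihr]
      simp [pvG, hd']

-- the append-building loop is a map
theorem pvFoldl_append_map (f : Int → Int) (l : List Int) :
    ∀ acc : List Int, l.foldl (fun a i => a ++ [f i]) acc = acc ++ l.map f := by
  induction l with
  | nil => simp
  | cons x rest ih => intro acc; simp [ih]

-- core B lemma: the cut fold plus the final extend realise the reference partition of the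
-- suffix, with the pending slice nodes[prev:k] assigned to the current side
theorem pvCoreB (nodes : List (List Int)) :
    ∀ (es : List Int) (k prev : Nat) (N S : List (List Int)) (st : Int),
      prev ≤ k → k + es.length = nodes.length →
      (∀ x ∈ es, x = 1 ∨ x = -1 ∨ x = 0) →
      pvFinishB nodes
        (((PySem.List.enumerate es (k : Int)).filter (fun p => p.2 != 0)).foldl
          (pvStepB nodes) ((N, S), (prev : Int), st)) =
      (N ++ (pvG ((((nodes.drop prev).take (k - prev)).map (fun x => (x, 0))) ++
                    (nodes.drop k).zip es) (decide (st = 1))).1,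
       S ++ (pvG ((((nodes.drop prev).take (k - prev)).map (fun x => (x, 0))) ++
                    (nodes.drop k).zip es) (decide (st = 1))).2.1) := by
  intro es
  induction es with
  | nil =>
    intro k prev N S st hpk hlen _
    have hk : k = nodes.length := by simpa using hlen
    have htake : (nodes.drop prev).take (k - prev) = nodes.drop prev := by
      apply List.take_of_length_le; simp; omega
    have hslice : PySem.List.slice nodes (some (prev : Int)) none = nodes.drop prev :=
      PySem.List.slice_from_natCast nodes prev
    simp only [PySem.List.enumerate_nil, List.filter_nil, List.foldl_nil, pvFinishB,
      hslice, htake, List.zip_nil_right, List.append_nil, pvG_zeros]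
    by_cases hst : st = 1 <;> simp [hst]
  | cons e rest ih =>
    intro k prev N S st hpk hlen hmem
    have hk : k < nodes.length := by simp at hlen; omega
    have hlen' : (k + 1) + rest.length = nodes.length := by simp at hlen; omega
    have hmem' : ∀ x ∈ rest, x = 1 ∨ x = -1 ∨ x = 0 :=
      fun x hx => hmem x (List.mem_cons_of_mem _ hx)
    have hdrop : nodes.drop k = nodes[k] :: nodes.drop (k + 1) :=
      List.drop_eq_getElem_cons hk
    have henum : PySem.List.enumerate (e :: rest) (k : Int) =
        ((k : Int), e) :: PySem.List.enumerate rest ((k + 1 : Nat) : Int) := by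
      rw [PySem.List.enumerate_cons]; push_cast; ring_nf
    have htake1 : (nodes.drop prev).take (k + 1 - prev) =
        (nodes.drop prev).take (k - prev) ++ [nodes[k]] := by
      have hlt : k - prev < (nodes.drop prev).length := by simp; omega
      have h1 : k + 1 - prev = (k - prev) + 1 := by omega
      rw [h1, List.take_add_one, List.getElem?_eq_getElem hlt]
      simp [List.getElem_drop, Nat.add_sub_cancel' hpk]
    by_cases he : e = 0
    · subst he
      rw [henum]
      simp only [List.filter_cons, bne_self_eq_false, Bool.false_eq_true, if_false]
      rw [ih (k + 1) prev N S st (by omega) hlen' hmem', htake1, hdrop]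
      simp only [List.map_append, List.map_cons, List.map_nil, List.zip_cons_cons,
        List.append_assoc, List.cons_append, List.nil_append]
    · have he1 : e = 1 ∨ e = -1 := by
        rcases hmem e (List.mem_cons_self ..) with h | h | h
        · exact Or.inl h
        · exact Or.inr h
        · exact absurd h he
      rw [henum]
      have hfilt : ((e != 0)) = true := by simpa using he
      simp only [List.filter_cons, hfilt, if_true, List.foldl_cons]
      have hslice : PySem.List.slice nodes (some (prev : Int)) (some (k : Int)) =
          (nodes.drop prev).take (k - prev) := PySem.List.slice_natCast nodes prev k
      have htk : (nodes.drop k).take (k + 1 - k) = [nodes[k]] := by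
        rw [show k + 1 - k = 1 from by omega, hdrop]; rfl
      have hGtail : ∀ (d : Bool) (Z : List (List Int × Int)),
          pvG ((nodes[k], e) :: Z) d = pvG ((nodes[k], 0) :: Z) (decide (e = 1)) := by
        intro d Z
        rcases he1 with h | h <;> subst h <;> simp [pvG, pvDirUpd]
      by_cases hst : st = 1
      · have hstep : pvStepB nodes ((N, S), (prev : Int), st) ((k : Int), e) =
            ((N ++ (nodes.drop prev).take (k - prev), S), (k : Int), e) := by
          simp [pvStepB, hslice, hst]
        rw [hstep]
        have ihr := ih (k + 1) k (N ++ (nodes.drop prev).take (k - prev)) S e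
          (by omega) hlen' hmem'
        rw [htk] at ihr
        simp only [List.map_cons, List.map_nil] at ihr
        rw [ihr, hdrop]
        simp only [List.zip_cons_cons, pvG_append, pvG_zeros, hst, decide_true,
          if_true, hGtail true]
        by_cases h1 : e = 1 <;> simp [pvG, pvDirUpd, List.append_assoc, h1]
      · have hstep : pvStepB nodes ((N, S), (prev : Int), st) ((k : Int), e) =
            ((N, S ++ (nodes.drop prev).take (k - prev)), (k : Int), e) := by
          simp [pvStepB, hslice, hst]
        rw [hstep]
        have ihr := ih (k + 1) k N (S ++ (nodes.drop prev).take (k - prev)) e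
          (by omega) hlen' hmem'
        rw [htk] at ihr
        simp only [List.map_cons, List.map_nil] at ihr
        rw [ihr, hdrop]
        have hd : decide (st = 1) = false := by simp [hst]
        simp only [List.zip_cons_cons, pvG_append, pvG_zeros, hd, Bool.false_eq_true,
          if_false, hGtail false]
        by_cases h1 : e = 1 <;> simp [pvG, pvDirUpd, List.append_assoc, h1]

-- ===== VERDICT (by name: the statement is the Claim_ definition above) =====
theorem returnNSGroups_spec : Claim_equal_returnNSGroups := by
  intro nodes _ _
  unfold Spec_returnNSGroups
  simp only [returnNSGroups, returnNSGroups_alt]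
  rw [pvFoldl_append_map]
  simp only [List.nil_append]
  have hELlen : ((PySem.List.pyRange 0 (nodes.length : Int) 1).map (pvEvB nodes)).length
      = nodes.length := by
    simp [PySem.List.length_pyRange_one]
  have hmem : ∀ x ∈ (PySem.List.pyRange 0 (nodes.length : Int) 1).map (pvEvB nodes),
      x = 1 ∨ x = -1 ∨ x = 0 := by
    intro x hx
    obtain ⟨i, -, rfl⟩ := List.mem_map.mp hx
    simp only [pvEvB]
    split_ifs <;> simp
  have hcore := pvCoreB nodes ((PySem.List.pyRange 0 (nodes.length : Int) 1).map (pvEvB nodes))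
    0 0 [] [] 1 (le_refl 0) (by simpa using hELlen) hmem
  simp only [Nat.cast_zero, Nat.sub_zero, List.drop_zero, List.take_zero, List.map_nil,
    List.nil_append, decide_true] at hcore
  have hM : (PySem.List.enumerate nodes 0).map (fun p => (p.2, pvEvB nodes p.1)) =
      nodes.zip ((PySem.List.pyRange 0 (nodes.length : Int) 1).map (pvEvB nodes)) := by
    apply List.ext_getElem
    · simp [PySem.List.length_enumerate, PySem.List.length_pyRange_one]
    · intro i h1 h2
      simp [PySem.List.getElem_enumerate, List.getElem_zip,
        PySem.List.getElem_pyRange_one]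
  rw [← hM] at hcore
  rw [hcore]
  -- A side
  have hrange : PySem.List.pyRange 0 (nodes.length : Int) 1 =
      (PySem.List.enumerate nodes 0).map (fun p => p.1) := by
    rw [PySem.List.map_fst_enumerate]; norm_num
  have H : ∀ p ∈ PySem.List.enumerate nodes 0,
      pvCurA nodes p.1 = p.2 ∧ ∀ d, pvUpdA nodes p.1 d = pvDirUpd (pvEvB nodes p.1) d := by
    intro p hp
    rw [PySem.List.mem_enumerate_iff] at hp
    obtain ⟨j, hj, rfl⟩ := hp
    constructor
    · simp [pvCurA, PySem.List.pyGet?_ofNat _ _ hj]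
    · intro d
      simpa using pvUpd_eq nodes j hj d
  rw [hrange, List.foldl_map, pvFoldA_eq nodes _ H]
  simp
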